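-- pv_equiv track=rewrite | github.com/pypi-data/pypi-mirror-279 | packages/p-vs-np-library/p_vs_np_library-0.1.tar.gz/p_vs_np_library-0.1/p_vs_np/flow_problems/intersection_pattern.py | has_intersection_pattern
-- ===== SOURCE A (Python) =====
-- def has_intersection_pattern(sets):
--     n = len(sets)
--
--     for i in range(1 << n):
--         pattern = set()
--
--         for j in range(n):
--             if i & (1 << j):
--                 pattern.update(sets[j])
--
--         is_valid_pattern = True
--
--         for k in range(n):
--             if not any(element in sets[k] for element in pattern):
--                 is_valid_pattern = False
--                 break
--
--         if is_valid_pattern: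
--             return True
--
--     return False
-- ===== SOURCE B (Python) =====
-- def has_intersection_pattern(sets):
--     # Some subset-union intersects every set iff every set is nonempty
--     # (the full union works by monotonicity; an empty set defeats any pattern).
--     return all(len(s) != 0 for s in sets)
-- ===== Notes on version B (the rewrite author's own statement) =====
-- stated objective: simpler
-- what changed: Replaced the enumeration of all subset-unions (with set-building and per-set intersection tests) by the observation that the full union succeeds iff every set is nonempty, so B is a one-line emptiness scan.
import Mathlib
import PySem

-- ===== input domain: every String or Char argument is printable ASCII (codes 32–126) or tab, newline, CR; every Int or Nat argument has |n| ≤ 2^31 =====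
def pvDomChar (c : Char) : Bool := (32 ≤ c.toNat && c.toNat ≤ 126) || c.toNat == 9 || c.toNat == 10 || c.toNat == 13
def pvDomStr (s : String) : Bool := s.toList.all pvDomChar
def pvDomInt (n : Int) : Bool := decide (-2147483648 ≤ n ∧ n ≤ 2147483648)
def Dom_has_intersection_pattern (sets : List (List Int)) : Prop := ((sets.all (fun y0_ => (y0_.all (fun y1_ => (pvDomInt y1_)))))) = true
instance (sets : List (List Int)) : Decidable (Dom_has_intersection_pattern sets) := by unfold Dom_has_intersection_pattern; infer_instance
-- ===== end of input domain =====

-- B replaces A's exponential enumeration of subset-unions by a single emptiness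
-- scan (some subset-union intersects every set iff every set is nonempty).

-- ===== PORT A =====
-- 'pattern = set(); for j in range(n): if i & (1 << j): pattern.update(sets[j])'
-- (j ranges over range(n) so j ≥ 0 and '1 << j' is exactly 'Int.shiftLeft 1 j.toNat';
--  sets[j] is in range, so pyGetD is exact here)
def hipPattern (sets : List (List Int)) (i : Int) : PySem.Set Int :=
  (PySem.List.pyRange 0 sets.length 1).foldl
    (fun p j =>
      if PySem.Int.band i (Int.shiftLeft 1 j.toNat) ≠ 0 then
        PySem.Set.update p (PySem.List.pyGetD sets j [])
      else p)
    PySem.Set.empty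

-- 'for k in range(n): if not any(element in sets[k] for element in pattern): … break'
-- returns the final is_valid_pattern ('any' over the set's elements is order-independent)
def hipValid (sets : List (List Int)) (pattern : PySem.Set Int) : List Int → Bool
  | [] => true
  | k :: ks =>
    if !(pattern.any (fun e => (PySem.List.pyGetD sets k []).contains e)) then false
    else hipValid sets pattern ks

-- 'for i in range(1 << n): … if is_valid_pattern: return True' / 'return False'
def hipLoop (sets : List (List Int)) : List Int → Bool
  | [] => false
  | i :: rest =>
    if hipValid sets (hipPattern sets i) (PySem.List.pyRange 0 sets.length 1) then true
    else hipLoop sets rest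

def has_intersection_pattern (sets : List (List Int)) : Bool :=
  hipLoop sets (PySem.List.pyRange 0 (Int.shiftLeft 1 sets.length) 1)

-- ===== PORT B =====
def has_intersection_pattern_alt (sets : List (List Int)) : Bool :=
  sets.all (fun s => decide (s.length ≠ 0))

-- ===== PRECONDITION & SPEC =====
def Spec_has_intersection_pattern (sets : List (List Int)) (out : Bool) : Prop := out = has_intersection_pattern_alt sets
instance (sets : List (List Int)) (out : Bool) : Decidable (Spec_has_intersection_pattern sets out) := by unfold Spec_has_intersection_pattern; infer_instance

-- ===== CLAIM (what is proved, stated in full; the proofs are below) =====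
def Claim_equal_has_intersection_pattern : Prop := ∀ (sets : List (List Int)), Dom_has_intersection_pattern sets → Spec_has_intersection_pattern sets (has_intersection_pattern sets)

-- ===== LEMMAS AND PROOFS =====

theorem hip_shift (n : Nat) : Int.shiftLeft 1 n = 2 ^ n := by
  simp [Int.shiftLeft, Nat.shiftLeft_eq]

-- membership is preserved by the pattern-building fold
theorem hip_mem_foldl (sets : List (List Int)) (i x : Int) (l : List Int)
    (p : PySem.Set Int) (hx : x ∈ p) :
    x ∈ l.foldl
      (fun p j =>
        if PySem.Int.band i (Int.shiftLeft 1 j.toNat) ≠ 0 then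
          PySem.Set.update p (PySem.List.pyGetD sets j [])
        else p) p := by
  induction l generalizing p with
  | nil => exact hx
  | cons j l ih =>
    simp only [List.foldl_cons]
    apply ih
    split
    · exact (PySem.Set.mem_update _ _ _).mpr (Or.inl hx)
    · exact hx

-- an element of sets[j] enters the pattern when bit j of i is set
theorem hip_mem_pattern (sets : List (List Int)) (i x j : Int)
    (hj : j ∈ PySem.List.pyRange 0 sets.length 1)
    (hb : PySem.Int.band i (Int.shiftLeft 1 j.toNat) ≠ 0)
    (hx : x ∈ PySem.List.pyGetD sets j []) :
    x ∈ hipPattern sets i := by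
  unfold hipPattern
  obtain ⟨l1, l2, hsplit⟩ := List.mem_iff_append.mp hj
  rw [hsplit, List.foldl_append, List.foldl_cons, if_pos hb]
  exact hip_mem_foldl sets i x l2 _ ((PySem.Set.mem_update _ _ _).mpr (Or.inr hx))

theorem hipValid_false (sets : List (List Int)) (p : PySem.Set Int) (ks : List Int)
    (h : ∃ k ∈ ks, PySem.List.pyGetD sets k [] = []) : hipValid sets p ks = false := by
  induction ks with
  | nil => simp at h
  | cons k ks ih =>
    unfold hipValid
    split
    · rfl
    · rename_i hp
      rcases h with ⟨k', hk', hke⟩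
      rcases List.mem_cons.mp hk' with rfl | hmem
      · exfalso; apply hp; simp [hke]
      · exact ih ⟨k', hmem, hke⟩

theorem hipValid_true (sets : List (List Int)) (p : PySem.Set Int) (ks : List Int)
    (h : ∀ k ∈ ks, p.any (fun e => (PySem.List.pyGetD sets k []).contains e) = true) :
    hipValid sets p ks = true := by
  induction ks with
  | nil => rfl
  | cons k ks ih =>
    unfold hipValid
    rw [h k (List.mem_cons_self), ih (fun k' hk' => h k' (List.mem_cons_of_mem _ hk'))]
    rfl

theorem hipLoop_false (sets : List (List Int)) (is : List Int)
    (h : ∀ i ∈ is, hipValid sets (hipPattern sets i) (PySem.List.pyRange 0 sets.length 1) = false) :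
    hipLoop sets is = false := by
  induction is with
  | nil => rfl
  | cons i is ih =>
    unfold hipLoop
    rw [h i (List.mem_cons_self)]
    exact ih (fun i' hi' => h i' (List.mem_cons_of_mem _ hi'))

theorem hipLoop_true (sets : List (List Int)) (is : List Int) (i : Int) (hi : i ∈ is)
    (h : hipValid sets (hipPattern sets i) (PySem.List.pyRange 0 sets.length 1) = true) :
    hipLoop sets is = true := by
  induction is with
  | nil => simp at hi
  | cons i' is ih =>
    unfold hipLoop
    rcases List.mem_cons.mp hi with rfl | hmem
    · simp [h]
    · split
      · rfl
      · exact ih hmem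

-- bit j of 2^n - 1 is set for j < n
theorem hip_band_ne (n j : Nat) (hj : j < n) :
    PySem.Int.band ((Int.shiftLeft 1 n) - 1) (Int.shiftLeft 1 j) ≠ 0 := by
  have h1 : (Int.shiftLeft 1 n) - 1 = ((2 ^ n - 1 : Nat) : Int) := by
    rw [hip_shift]
    have : (1 : Nat) ≤ 2 ^ n := Nat.one_le_two_pow
    push_cast [this]
    ring
  have h2 : Int.shiftLeft 1 j = ((2 ^ j : Nat) : Int) := by
    rw [hip_shift]; push_cast; ring
  rw [h1, h2, PySem.Int.band_natCast]
  intro hz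
  have hz' : (2 ^ n - 1) &&& 2 ^ j = 0 := by exact_mod_cast hz
  have ht : ((2 ^ n - 1) &&& 2 ^ j).testBit j = true := by
    rw [Nat.testBit_land, Nat.testBit_two_pow_sub_one, Nat.testBit_two_pow_self]
    simp [hj]
  rw [hz'] at ht
  simp at ht

theorem hip_main (sets : List (List Int)) :
    has_intersection_pattern sets = has_intersection_pattern_alt sets := by
  by_cases hall : ∀ s ∈ sets, s.length ≠ 0
  · -- every set nonempty: both sides true; witness i = 2^n - 1 (the full union)
    have hb : has_intersection_pattern_alt sets = true := by
      simpa [has_intersection_pattern_alt] using hall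
    rw [hb]
    unfold has_intersection_pattern
    apply hipLoop_true sets _ ((Int.shiftLeft 1 sets.length) - 1)
    · rw [PySem.List.mem_pyRange_one, hip_shift]
      have : (1 : Int) ≤ 2 ^ sets.length := one_le_pow₀ (by norm_num)
      omega
    · apply hipValid_true
      intro k hk
      rw [PySem.List.mem_pyRange_one] at hk
      have hk2 : k.toNat < sets.length := by omega
      have hget : PySem.List.pyGetD sets k [] = sets[k.toNat] :=
        PySem.List.pyGetD_eq_getElem sets [] hk.1 hk.2
      have hne : sets[k.toNat] ≠ [] := by
        intro h
        exact hall sets[k.toNat] (List.getElem_mem hk2) (by rw [h]; rfl)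
      obtain ⟨e, es, hes⟩ := List.exists_cons_of_ne_nil hne
      have hemem : e ∈ PySem.List.pyGetD sets k [] := by
        rw [hget, hes]; exact List.mem_cons_self
      have hpat : e ∈ hipPattern sets ((Int.shiftLeft 1 sets.length) - 1) := by
        apply hip_mem_pattern sets _ e k
        · rw [PySem.List.mem_pyRange_one]; exact ⟨hk.1, hk.2⟩
        · exact hip_band_ne sets.length k.toNat hk2
        · exact hemem
      rw [List.any_eq_true]
      exact ⟨e, hpat, by rw [List.contains_iff_mem]; exact hemem⟩
  · -- some set is empty: no pattern can intersect it, both sides false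
    push Not at hall
    obtain ⟨s, hs, hlen⟩ := hall
    have hb : has_intersection_pattern_alt sets = false := by
      simp only [has_intersection_pattern_alt, List.all_eq_false]
      exact ⟨s, hs, by simpa using hlen⟩
    rw [hb]
    obtain ⟨k, hk, hks⟩ := List.getElem_of_mem hs
    unfold has_intersection_pattern
    apply hipLoop_false
    intro i _
    apply hipValid_false
    refine ⟨(k : Int), ?_, ?_⟩
    · rw [PySem.List.mem_pyRange_one]
      exact ⟨Int.natCast_nonneg k, by exact_mod_cast hk⟩
    · rw [PySem.List.pyGetD_eq_getElem sets [] (Int.natCast_nonneg k) (by exact_mod_cast hk)]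
      simp only [Int.toNat_natCast]
      rw [hks]
      exact List.length_eq_zero_iff.mp (by simpa using hlen)

-- ===== VERDICT (by name: the statement is the Claim_ definition above) =====
theorem has_intersection_pattern_spec : Claim_equal_has_intersection_pattern := by
  intro sets _
  unfold Spec_has_intersection_pattern
  exact hip_main sets
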